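-- pv_equiv track=rewrite | github.com/rayger14/Bull-machine- | bin/optimize_v18.py | create_walk_forward_folds
-- ===== SOURCE A (Python) =====
-- from typing import Dict, List, Tuple, Optional
--
-- def create_walk_forward_folds(start_year: int = 2022, n_years: int = 3) -> List[Tuple[str, str]]:
--     """
--     Create walk-forward fold pairs.
--
--     Example for 3 years:
--     - Fold 1: Train 2022-01 to 2022-06, Test 2022-07 to 2022-12
--     - Fold 2: Train 2022-07 to 2022-12, Test 2023-01 to 2023-06
--     - Fold 3: Train 2023-01 to 2023-06, Test 2023-07 to 2023-12
--     - ...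
--     """
--     folds = []
--
--     for year in range(start_year, start_year + n_years):
--         # H1 fold
--         train_start = f"{year}-01-01"
--         train_end = f"{year}-06-30"
--         test_start = f"{year}-07-01"
--         test_end = f"{year}-12-31"
--         folds.append(((train_start, train_end), (test_start, test_end)))
--
--         # H2 fold
--         train_start = f"{year}-07-01"
--         train_end = f"{year}-12-31"
--         test_start = f"{year+1}-01-01"
--         test_end = f"{year+1}-06-30"
--         if year < start_year + n_years - 1:
--             folds.append(((train_start, train_end), (test_start, test_end)))
--
--     return folds
-- ===== SOURCE B (Python) =====
-- def create_walk_forward_folds(start_year: int = 2022, n_years: int = 3):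
--     """Precompute the flat list of half-year periods, then slide consecutive pairs."""
--     periods = []
--     for i in range(2 * n_years):
--         y = start_year + i // 2
--         if i % 2 == 0:
--             periods.append((f"{y}-01-01", f"{y}-06-30"))
--         else:
--             periods.append((f"{y}-07-01", f"{y}-12-31"))
--     return list(zip(periods, periods[1:]))
-- ===== Notes on version B (the rewrite author's own statement) =====
-- stated objective: simpler
-- what changed: B precomputes the flat list of 2*n_years half-year periods (year = start_year + i//2, half by parity) and forms the folds by zipping the list with its own tail, replacing A's per-year H1-always / H2-if-not-last-year branching inside the loop.
import Mathlib
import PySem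

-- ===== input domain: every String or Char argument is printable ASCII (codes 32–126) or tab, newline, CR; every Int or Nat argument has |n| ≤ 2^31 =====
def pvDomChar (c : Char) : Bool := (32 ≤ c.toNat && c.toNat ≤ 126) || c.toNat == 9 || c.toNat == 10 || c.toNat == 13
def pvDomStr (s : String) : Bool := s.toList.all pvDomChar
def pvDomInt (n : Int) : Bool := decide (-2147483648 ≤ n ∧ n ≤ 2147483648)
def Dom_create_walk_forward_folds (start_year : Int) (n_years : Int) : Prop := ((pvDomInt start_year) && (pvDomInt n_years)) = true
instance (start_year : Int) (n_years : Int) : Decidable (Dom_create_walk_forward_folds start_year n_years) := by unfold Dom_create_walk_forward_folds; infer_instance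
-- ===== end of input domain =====

-- B builds the flat list of half-year periods once and zips consecutive pairs instead of
-- A's per-year H1-always / H2-if-not-last branching (objective: simpler decomposition).

-- ===== PORT A =====
-- loop body of A's `for year in range(start_year, start_year + n_years)` (literal, lets as in Python)
def pvStepA (start_year : Int) (n_years : Int)
    (folds : List ((String × String) × (String × String))) (year : Int) :
    List ((String × String) × (String × String)) :=
  let train_start := PySem.Int.toStr year ++ "-01-01"
  let train_end := PySem.Int.toStr year ++ "-06-30"
  let test_start := PySem.Int.toStr year ++ "-07-01"
  let test_end := PySem.Int.toStr year ++ "-12-31"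
  let folds := folds ++ [((train_start, train_end), (test_start, test_end))]
  let train_start := PySem.Int.toStr year ++ "-07-01"
  let train_end := PySem.Int.toStr year ++ "-12-31"
  let test_start := PySem.Int.toStr (year + 1) ++ "-01-01"
  let test_end := PySem.Int.toStr (year + 1) ++ "-06-30"
  if year < start_year + n_years - 1 then
    folds ++ [((train_start, train_end), (test_start, test_end))]
  else folds

def create_walk_forward_folds (start_year : Int) (n_years : Int) :
    List ((String × String) × (String × String)) :=
  (PySem.List.pyRange start_year (start_year + n_years) 1).foldl (pvStepA start_year n_years) []

-- ===== PORT B =====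
-- loop body of B's `for i in range(2 * n_years)` building the half-year period list
def pvStepB (start_year : Int) (periods : List (String × String)) (i : Int) :
    List (String × String) :=
  let y := start_year + PySem.Int.floordiv i 2
  if PySem.Int.mod i 2 == 0 then
    periods ++ [(PySem.Int.toStr y ++ "-01-01", PySem.Int.toStr y ++ "-06-30")]
  else
    periods ++ [(PySem.Int.toStr y ++ "-07-01", PySem.Int.toStr y ++ "-12-31")]

def create_walk_forward_folds_alt (start_year : Int) (n_years : Int) :
    List ((String × String) × (String × String)) :=
  let periods := (PySem.List.pyRange 0 (2 * n_years) 1).foldl (pvStepB start_year) []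
  List.zip periods (PySem.List.slice periods (some 1) none)

-- ===== PRECONDITION & SPEC =====
def Spec_create_walk_forward_folds (start_year : Int) (n_years : Int) (out : List ((String × String) × (String × String))) : Prop := out = create_walk_forward_folds_alt start_year n_years
instance (start_year : Int) (n_years : Int) (out : List ((String × String) × (String × String))) : Decidable (Spec_create_walk_forward_folds start_year n_years out) := by unfold Spec_create_walk_forward_folds; infer_instance

-- ===== CLAIM (what is proved, stated in full; the proofs are below) =====
def Claim_equal_create_walk_forward_folds : Prop := ∀ (start_year : Int) (n_years : Int), Dom_create_walk_forward_folds start_year n_years → Spec_create_walk_forward_folds start_year n_years (create_walk_forward_folds start_year n_years)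

-- ===== LEMMAS AND PROOFS =====

-- the two half-year periods of a year
def pvH1 (y : Int) : String × String :=
  (PySem.Int.toStr y ++ "-01-01", PySem.Int.toStr y ++ "-06-30")
def pvH2 (y : Int) : String × String :=
  (PySem.Int.toStr y ++ "-07-01", PySem.Int.toStr y ++ "-12-31")

-- common intended value: the walk-forward folds for m years starting at a
def pvW : Int → Nat → List ((String × String) × (String × String))
  | _, 0 => []
  | a, 1 => [(pvH1 a, pvH2 a)]
  | a, (m+2) => (pvH1 a, pvH2 a) :: (pvH2 a, pvH1 (a+1)) :: pvW (a+1) (m+1)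

-- the flat list of half-year periods for m years starting at a
def pvQ : Int → Nat → List (String × String)
  | _, 0 => []
  | a, (m+1) => pvH1 a :: pvH2 a :: pvQ (a+1) m

theorem pvQ_append (m : Nat) : ∀ (a : Int),
    pvQ a (m+1) = pvQ a m ++ [pvH1 (a + m), pvH2 (a + m)] := by
  induction m with
  | zero => intro a; simp [pvQ]
  | succ m ih =>
    intro a
    have h1 : a + 1 + (m : Int) = a + ((m : Nat) + 1 : Nat) := by push_cast; ring
    calc pvQ a (m+2) = pvH1 a :: pvH2 a :: pvQ (a+1) (m+1) := by simp [pvQ]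
      _ = pvH1 a :: pvH2 a :: (pvQ (a+1) m ++ [pvH1 (a+1+m), pvH2 (a+1+m)]) := by rw [ih]
      _ = pvQ a (m+1) ++ [pvH1 (a + (m+1 : Nat)), pvH2 (a + (m+1 : Nat))] := by
            rw [h1]; simp [pvQ]

-- B's period loop computes pvQ
theorem pvPeriods_eq (m : Nat) (a : Int) :
    (PySem.List.pyRange 0 (2 * (m : Int)) 1).foldl (pvStepB a) [] = pvQ a m := by
  induction m with
  | zero => simp [PySem.List.pyRange_one_eq_nil, pvQ]
  | succ m ih =>
    have hsplit : (2 * ((m : Int) + 1)) = (2 * (m : Int) + 1) + 1 := by ring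
    have hd0 : PySem.Int.floordiv (2 * (m : Int)) 2 = m := by
      rw [PySem.Int.floordiv_eq_iff_of_pos (by omega)]; omega
    have hm0 : PySem.Int.mod (2 * (m : Int)) 2 = 0 := by
      have := PySem.Int.floordiv_mul_add_mod (2 * (m : Int)) 2
      rw [hd0] at this; omega
    have hd1 : PySem.Int.floordiv (2 * (m : Int) + 1) 2 = m := by
      rw [PySem.Int.floordiv_eq_iff_of_pos (by omega)]; omega
    have hm1 : PySem.Int.mod (2 * (m : Int) + 1) 2 = 1 := by
      have := PySem.Int.floordiv_mul_add_mod (2 * (m : Int) + 1) 2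
      rw [hd1] at this; omega
    have e0 : pvStepB a (pvQ a m) (2 * (m : Int)) = pvQ a m ++ [pvH1 (a + (m : Int))] := by
      simp only [pvStepB, hd0, hm0, pvH1]
      simp
    have e1 : pvStepB a (pvQ a m ++ [pvH1 (a + (m : Int))]) (2 * (m : Int) + 1)
        = pvQ a m ++ [pvH1 (a + (m : Int)), pvH2 (a + (m : Int))] := by
      simp only [pvStepB, hd1, hm1, pvH2]
      simp
    push_cast
    rw [hsplit, PySem.List.pyRange_one_succ_right (by omega),
        PySem.List.pyRange_one_succ_right (by omega),
        List.foldl_append, List.foldl_append, ih]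
    simp only [List.foldl_cons, List.foldl_nil]
    rw [e0, e1, pvQ_append m a]

-- zipping pvQ with its tail gives the folds
theorem pvZipQ : ∀ (m : Nat) (a : Int),
    List.zip (pvQ a m) ((pvQ a m).tail) = pvW a m
  | 0, a => by simp [pvQ, pvW]
  | 1, a => by simp [pvQ, pvW]
  | (m+2), a => by
    have ih := pvZipQ (m+1) (a+1)
    simp only [pvQ, List.tail_cons, List.zip_cons_cons] at ih ⊢
    rw [ih]
    simp [pvW]

-- A's loop with an arbitrary accumulator and fixed bound
def pvWA : Int → Nat → Int → List ((String × String) × (String × String))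
  | _, 0, _ => []
  | a, (m+1), B =>
      ((pvH1 a, pvH2 a) :: (if a < B then [(pvH2 a, pvH1 (a+1))] else [])) ++ pvWA (a+1) m B

theorem pvFoldA (m : Nat) : ∀ (a : Int) (s n : Int)
    (acc : List ((String × String) × (String × String))),
    s + n - 1 = a + m - 1 →
    (PySem.List.pyRange a (a + (m : Int)) 1).foldl (pvStepA s n) acc
      = acc ++ pvWA a m (s + n - 1) := by
  induction m with
  | zero => intro a s n acc _; simp [PySem.List.pyRange_one_eq_nil, pvWA]
  | succ m ih =>
    intro a s n acc hB
    rw [PySem.List.pyRange_one_cons (by omega)]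
    have harg : a + ((m : Nat) + 1 : Nat) = (a + 1) + (m : Int) := by push_cast; ring
    rw [List.foldl_cons, harg, ih (a+1) s n _ (by push_cast at hB ⊢; omega)]
    have hstep : pvStepA s n acc a
        = acc ++ ((pvH1 a, pvH2 a) :: (if a < s + n - 1 then [(pvH2 a, pvH1 (a+1))] else [])) := by
      simp only [pvStepA, pvH1, pvH2]
      split <;> simp
    rw [hstep]
    simp [pvWA]

theorem pvWA_eq_W : ∀ (m : Nat) (a : Int), pvWA a m (a + m - 1) = pvW a m
  | 0, a => by simp [pvWA, pvW]
  | 1, a => by simp [pvWA, pvW]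
  | (m+2), a => by
    have ih := pvWA_eq_W (m+1) (a+1)
    have hB : a + ((m : Nat) + 2 : Nat) - 1 = (a+1) + ((m : Nat) + 1 : Nat) - 1 := by
      push_cast; ring
    have hlt : a < a + ((m : Nat) + 2 : Nat) - 1 := by push_cast; omega
    have step : pvWA a (m+2) (a + ((m : Nat) + 2 : Nat) - 1)
        = ((pvH1 a, pvH2 a) :: (if a < a + ((m : Nat) + 2 : Nat) - 1
            then [(pvH2 a, pvH1 (a+1))] else []))
          ++ pvWA (a+1) (m+1) (a + ((m : Nat) + 2 : Nat) - 1) := rfl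
    rw [step, if_pos hlt, hB, ih]
    simp [pvW]

theorem pvA_eq_W (s n : Int) (hn : 0 < n) :
    create_walk_forward_folds s n = pvW s n.toNat := by
  unfold create_walk_forward_folds
  have hcast : s + n = s + (n.toNat : Int) := by omega
  rw [hcast, pvFoldA n.toNat s s n [] (by omega)]
  have : s + n - 1 = s + (n.toNat : Int) - 1 := by omega
  rw [this, pvWA_eq_W]
  simp

theorem pvB_eq_W (s n : Int) (hn : 0 < n) :
    create_walk_forward_folds_alt s n = pvW s n.toNat := by
  have hcast : 2 * n = 2 * (n.toNat : Int) := by omega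
  show List.zip ((PySem.List.pyRange 0 (2 * n) 1).foldl (pvStepB s) [])
      (PySem.List.slice ((PySem.List.pyRange 0 (2 * n) 1).foldl (pvStepB s) []) (some 1) none)
      = pvW s n.toNat
  rw [hcast, pvPeriods_eq n.toNat s, PySem.List.slice_from_one, pvZipQ]

-- ===== VERDICT (by name: the statement is the Claim_ definition above) =====
theorem create_walk_forward_folds_spec : Claim_equal_create_walk_forward_folds := by
  intro s n _
  unfold Spec_create_walk_forward_folds
  by_cases hn : 0 < n
  · rw [pvA_eq_W s n hn, pvB_eq_W s n hn]
  · unfold create_walk_forward_folds create_walk_forward_folds_alt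
    rw [PySem.List.pyRange_one_eq_nil (by omega), PySem.List.pyRange_one_eq_nil (by omega)]
    simp
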